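-- pv_equiv track=rewrite | github.com/donjosh-ua/natures_symphony | controller/buscador.py | score_hashes_against_database
-- ===== SOURCE A (Python) =====
-- def score_hashes_against_database(hashes, database):
--
--     matches_per_audio = {}
--     for hash, (sample_time, _) in hashes.items():
--         if hash in database:
--             matching_occurences = database[hash]
--             for source_time, audio_index in matching_occurences:
--                 if audio_index not in matches_per_audio:
--                     matches_per_audio[audio_index] = []
--                 matches_per_audio[audio_index].append((hash, sample_time, source_time))
--
--     scores = {}
--     for audio_index, matches in matches_per_audio.items():
--         audio_scores_by_offset = {}
--         for hash, sample_time, source_time in matches: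
--             delta = source_time - sample_time
--             if delta not in audio_scores_by_offset:
--                 audio_scores_by_offset[delta] = 0
--             audio_scores_by_offset[delta] += 1
--
--         max = (0, 0)
--         for offset, score in audio_scores_by_offset.items():
--             if score > max[1]:
--                 max = (offset, score)
--
--         scores[audio_index] = max
--
--     # Sort the scores for the user
--     scores = list(sorted(scores.items(), key=lambda x: x[1][1], reverse=True))
--
--     return scores
-- ===== SOURCE B (Python) =====
-- def score_hashes_against_database(hashes, database):
--     # One fused pass: accumulate per-audio offset histograms directly,
--     # never materialising the intermediate per-audio match lists.
--     histograms = {}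
--     for h, (sample_time, _) in hashes.items():
--         occurrences = database.get(h)
--         if occurrences is None:
--             continue
--         for source_time, audio_index in occurrences:
--             counts = histograms.get(audio_index, {})
--             delta = source_time - sample_time
--             counts[delta] = counts.get(delta, 0) + 1
--             histograms[audio_index] = counts
--     scores = []
--     for audio_index, counts in histograms.items():
--         scores.append((audio_index, max(counts.items(), key=lambda kv: kv[1], default=(0, 0))))
--     return sorted(scores, key=lambda x: x[1][1], reverse=True)
-- ===== Notes on version B (the rewrite author's own statement) =====
-- stated objective: simpler
-- what changed: B fuses the two passes into one loop that accumulates a nested offset histogram per audio index directly (never building the intermediate per-audio list of match triples), takes each audio's best offset with max(..., key=..., default=(0,0)) instead of a hand-rolled scan, and collects the scores in a plain list instead of a second dict.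
import Mathlib
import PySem

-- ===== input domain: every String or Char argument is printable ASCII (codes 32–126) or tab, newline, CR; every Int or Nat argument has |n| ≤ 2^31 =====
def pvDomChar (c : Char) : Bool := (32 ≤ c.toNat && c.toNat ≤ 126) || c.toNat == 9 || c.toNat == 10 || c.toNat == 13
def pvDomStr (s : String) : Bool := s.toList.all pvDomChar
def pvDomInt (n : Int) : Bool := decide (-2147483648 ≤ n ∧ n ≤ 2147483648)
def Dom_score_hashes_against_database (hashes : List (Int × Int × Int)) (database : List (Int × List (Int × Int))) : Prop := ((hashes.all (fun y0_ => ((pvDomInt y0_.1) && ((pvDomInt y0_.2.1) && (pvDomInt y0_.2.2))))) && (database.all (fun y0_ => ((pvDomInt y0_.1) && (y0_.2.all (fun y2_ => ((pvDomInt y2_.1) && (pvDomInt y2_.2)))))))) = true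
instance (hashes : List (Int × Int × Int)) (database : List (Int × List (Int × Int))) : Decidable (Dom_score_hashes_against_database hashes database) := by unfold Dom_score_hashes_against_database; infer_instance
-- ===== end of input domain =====

-- B fuses A's two passes into one loop building a nested per-audio offset histogram directly
-- (no intermediate match-triple lists), and finishes with max(…, key, default) and a plain
-- score list; objective: simpler. Return-value equivalence only (neither mutates its arguments).

-- ===== PORT A =====
def score_hashes_against_database (hashes : List (Int × Int × Int)) (database : List (Int × List (Int × Int))) : List (Int × (Int × Int)) :=
  let hd := PySem.Dict.ofList hashes
  let db := PySem.Dict.ofList database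
  -- for hash, (sample_time, _) in hashes.items(): if hash in database: for source_time, audio_index in database[hash]: …
  let matches_per_audio : PySem.Dict Int (List (Int × Int × Int)) :=
    hd.items.foldl (fun m p =>
      match db.get? p.1 with
      | some matching_occurences =>
          matching_occurences.foldl
            (fun m q => m.modify q.2 [] (fun l => l ++ [(p.1, p.2.1, q.1)])) m
      | none => m) PySem.Dict.empty
  let scores : PySem.Dict Int (Int × Int) :=
    matches_per_audio.items.foldl (fun s r =>
      let audio_scores_by_offset : PySem.Dict Int Int :=
        r.2.foldl (fun d t => d.modify (t.2.2 - t.2.1) 0 (fun c => c + 1)) PySem.Dict.empty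
      let mx := audio_scores_by_offset.items.foldl
        (fun mx os => if os.2 > mx.2 then os else mx) ((0 : Int), (0 : Int))
      s.insert r.1 mx) PySem.Dict.empty
  PySem.List.sorted scores.items (fun x => x.2.2) true

-- ===== PORT B =====
def score_hashes_against_database_alt (hashes : List (Int × Int × Int)) (database : List (Int × List (Int × Int))) : List (Int × (Int × Int)) :=
  let hd := PySem.Dict.ofList hashes
  let db := PySem.Dict.ofList database
  let histograms : PySem.Dict Int (PySem.Dict Int Int) :=
    hd.items.foldl (fun hist p =>
      match db.get? p.1 with
      | none => hist   -- occurrences is None: continue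
      | some occurrences =>
          occurrences.foldl (fun hist q =>
            let counts := hist.getD q.2 PySem.Dict.empty
            let delta := q.1 - p.2.1
            hist.insert q.2 (counts.insert delta (counts.getD delta 0 + 1))) hist)
      PySem.Dict.empty
  let scores : List (Int × (Int × Int)) :=
    histograms.items.foldl (fun acc r =>
      acc ++ [(r.1, PySem.List.maxD r.2.items (fun kv => kv.2) ((0 : Int), (0 : Int)))]) []
  PySem.List.sorted scores (fun x => x.2.2) true

-- ===== PRECONDITION & SPEC =====
def Spec_score_hashes_against_database (hashes : List (Int × Int × Int)) (database : List (Int × List (Int × Int))) (out : List (Int × (Int × Int))) : Prop := out = score_hashes_against_database_alt hashes database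
instance (hashes : List (Int × Int × Int)) (database : List (Int × List (Int × Int))) (out : List (Int × (Int × Int))) : Decidable (Spec_score_hashes_against_database hashes database out) := by unfold Spec_score_hashes_against_database; infer_instance

-- ===== CLAIM (what is proved, stated in full; the proofs are below) =====
def Claim_equal_score_hashes_against_database : Prop := ∀ (hashes : List (Int × Int × Int)) (database : List (Int × List (Int × Int))), Dom_score_hashes_against_database hashes database → Spec_score_hashes_against_database hashes database (score_hashes_against_database hashes database)

-- ===== LEMMAS AND PROOFS =====

def pvCnt (ms : List (Int × Int × Int)) : PySem.Dict Int Int :=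
  PySem.Dict.counter (ms.map (fun t => t.2.2 - t.2.1))

def pvMapC (m : PySem.Dict Int (List (Int × Int × Int))) : PySem.Dict Int (PySem.Dict Int Int) :=
  PySem.Dict.mk (m.items.map (fun r => (r.1, pvCnt r.2)))

theorem pvMapC_get? (m : PySem.Dict Int (List (Int × Int × Int))) (k : Int) :
    (pvMapC m).get? k = (m.get? k).map pvCnt := by
  simp [pvMapC, PySem.Dict.get?, List.find?_map, Option.map_map, Function.comp_def]

theorem pvMapC_getD (m : PySem.Dict Int (List (Int × Int × Int))) (k : Int) :
    (pvMapC m).getD k PySem.Dict.empty = pvCnt (m.getD k []) := by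
  simp only [PySem.Dict.getD, pvMapC_get?]
  cases m.get? k with
  | none => rfl
  | some v => rfl

theorem pvMapC_contains (m : PySem.Dict Int (List (Int × Int × Int))) (k : Int) :
    (pvMapC m).contains k = m.contains k := by
  rw [PySem.Dict.contains_eq_isSome_get?, PySem.Dict.contains_eq_isSome_get?, pvMapC_get?]
  cases m.get? k <;> rfl

theorem pvMapC_insert (m : PySem.Dict Int (List (Int × Int × Int))) (k : Int) (v : List (Int × Int × Int)) :
    pvMapC (m.insert k v) = (pvMapC m).insert k (pvCnt v) := by
  apply PySem.Dict.ext
  show ((m.insert k v).items.map (fun r => (r.1, pvCnt r.2))) = _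
  rw [PySem.Dict.items_insert, PySem.Dict.items_insert, pvMapC_contains]
  by_cases hc : m.contains k = true
  · simp only [hc, if_pos, pvMapC, List.map_map]
    apply List.map_congr_left
    intro r _
    by_cases h : r.1 = k <;> simp [h]
  · simp only [Bool.not_eq_true] at hc
    simp [hc, pvMapC]

theorem pvCnt_append (ms : List (Int × Int × Int)) (t : Int × Int × Int) :
    pvCnt (ms ++ [t]) = (pvCnt ms).insert (t.2.2 - t.2.1) ((pvCnt ms).getD (t.2.2 - t.2.1) 0 + 1) := by
  rw [pvCnt, List.map_append, List.map_singleton, PySem.Dict.counter_append_singleton]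
  rfl

theorem pvStep (m : PySem.Dict Int (List (Int × Int × Int))) (h st src ai : Int) :
    (pvMapC m).insert ai
      (((pvMapC m).getD ai PySem.Dict.empty).insert (src - st)
        (((pvMapC m).getD ai PySem.Dict.empty).getD (src - st) 0 + 1))
    = pvMapC (m.modify ai [] (fun l => l ++ [(h, st, src)])) := by
  rw [PySem.Dict.modify, pvMapC_insert, pvCnt_append, pvMapC_getD]

theorem pvFoldInner (occ : List (Int × Int)) (p : Int × Int × Int) :
    ∀ (m : PySem.Dict Int (List (Int × Int × Int))),
    occ.foldl (fun hist q =>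
        let counts := hist.getD q.2 PySem.Dict.empty
        let delta := q.1 - p.2.1
        hist.insert q.2 (counts.insert delta (counts.getD delta 0 + 1))) (pvMapC m)
    = pvMapC (occ.foldl (fun m q => m.modify q.2 [] (fun l => l ++ [(p.1, p.2.1, q.1)])) m) := by
  induction occ with
  | nil => intro m; rfl
  | cons q occ ih =>
      intro m
      simp only [List.foldl_cons]
      rw [pvStep m p.1 p.2.1 q.1 q.2]
      exact ih _

theorem pvFoldOuter (db : PySem.Dict Int (List (Int × Int))) (l : List (Int × Int × Int)) :
    ∀ (m : PySem.Dict Int (List (Int × Int × Int))),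
    l.foldl (fun hist p =>
        match db.get? p.1 with
        | none => hist
        | some occurrences =>
            occurrences.foldl (fun hist q =>
              let counts := hist.getD q.2 PySem.Dict.empty
              let delta := q.1 - p.2.1
              hist.insert q.2 (counts.insert delta (counts.getD delta 0 + 1))) hist) (pvMapC m)
    = pvMapC (l.foldl (fun m p =>
        match db.get? p.1 with
        | some matching_occurences =>
            matching_occurences.foldl
              (fun m q => m.modify q.2 [] (fun l => l ++ [(p.1, p.2.1, q.1)])) m
        | none => m) m) := by
  induction l with
  | nil => intro m; rfl
  | cons p l ih =>
      intro m
      simp only [List.foldl_cons]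
      cases hdb : db.get? p.1 with
      | none => simp only [hdb]; exact ih m
      | some occ => simp only [hdb]; rw [pvFoldInner occ p m]; exact ih _

theorem pvANodup (db : PySem.Dict Int (List (Int × Int))) (l : List (Int × Int × Int)) :
    ∀ (m : PySem.Dict Int (List (Int × Int × Int))), m.keys.Nodup →
    (l.foldl (fun m p =>
        match db.get? p.1 with
        | some matching_occurences =>
            matching_occurences.foldl
              (fun m q => m.modify q.2 [] (fun l => l ++ [(p.1, p.2.1, q.1)])) m
        | none => m) m).keys.Nodup := by
  induction l with
  | nil => exact fun m h => h
  | cons p l ih =>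
      intro m hm
      simp only [List.foldl_cons]
      cases hdb : db.get? p.1 with
      | none => exact ih m hm
      | some occ =>
          simp only [hdb]
          exact ih _ (PySem.Dict.nodup_keys_foldl_modify_key occ (fun q => q.2) []
            (fun _ q => fun l => l ++ [(p.1, p.2.1, q.1)]) m hm)

theorem pvMax?_cons : ∀ (rest : List (Int × Int)) (a : Int × Int),
    PySem.List.max? (a :: rest) (fun kv => kv.2)
    = some (rest.foldl (fun mx os => if os.2 > mx.2 then os else mx) a) := by
  intro rest
  induction rest with
  | nil => intro a; simp [PySem.List.max?]
  | cons x rest ih =>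
      intro a
      have h2 : PySem.List.max? (a :: x :: rest) (fun kv : Int × Int => kv.2)
          = PySem.List.max? ((if a.2 < x.2 then x else a) :: rest) (fun kv => kv.2) := by
        by_cases h : a.2 < x.2 <;> simp [PySem.List.max?, h]
      rw [h2, ih]
      by_cases h : a.2 < x.2 <;> simp [List.foldl_cons, h]

theorem pvMaxScan (xs : List Int) :
    (PySem.Dict.counter xs).items.foldl (fun mx os => if os.2 > mx.2 then os else mx) ((0 : Int), (0 : Int))
    = PySem.List.maxD (PySem.Dict.counter xs).items (fun kv => kv.2) ((0 : Int), (0 : Int)) := by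
  rw [PySem.Dict.items_counter]
  rcases h : PySem.Set.ofList xs with _ | ⟨k, ks⟩
  · simp [PySem.List.maxD, PySem.List.max?]
  · have hk : k ∈ xs := (PySem.Set.mem_ofList xs k).mp (h ▸ List.mem_cons_self ..)
    have hc : (0 : Int) < ((xs.count k : Nat) : Int) := by
      exact_mod_cast List.count_pos_iff.mpr hk
    rw [PySem.List.maxD, List.map_cons, pvMax?_cons, List.foldl_cons,
      if_pos (show ((0:Int),(0:Int)).2 < ((xs.count k : Nat) : Int) from hc), Option.getD_some]

def pvMpa (hashes : List (Int × Int × Int)) (database : List (Int × List (Int × Int))) : PySem.Dict Int (List (Int × Int × Int)) :=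
  (PySem.Dict.ofList hashes).items.foldl (fun m p =>
      match (PySem.Dict.ofList database).get? p.1 with
      | some matching_occurences =>
          matching_occurences.foldl
            (fun m q => m.modify q.2 [] (fun l => l ++ [(p.1, p.2.1, q.1)])) m
      | none => m) PySem.Dict.empty

def pvScan (d : PySem.Dict Int Int) : Int × Int :=
  d.items.foldl (fun mx os => if os.2 > mx.2 then os else mx) ((0 : Int), (0 : Int))

def pvByOff (ms : List (Int × Int × Int)) : PySem.Dict Int Int :=
  ms.foldl (fun d t => d.modify (t.2.2 - t.2.1) 0 (fun c => c + 1)) PySem.Dict.empty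

theorem pvByOff_eq (ms : List (Int × Int × Int)) : pvByOff ms = pvCnt ms := by
  rw [pvCnt, pvByOff, PySem.Dict.counter, List.foldl_map]

theorem pvMain (hashes : List (Int × Int × Int)) (database : List (Int × List (Int × Int))) :
    score_hashes_against_database hashes database = score_hashes_against_database_alt hashes database := by
  have hA : score_hashes_against_database hashes database
      = PySem.List.sorted
          ((pvMpa hashes database).items.foldl
            (fun s r => s.insert r.1 (pvScan (pvByOff r.2))) PySem.Dict.empty).items
          (fun x => x.2.2) true := rfl
  have hB : score_hashes_against_database_alt hashes database
      = PySem.List.sorted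
          (((PySem.Dict.ofList hashes).items.foldl (fun hist p =>
              match (PySem.Dict.ofList database).get? p.1 with
              | none => hist
              | some occurrences =>
                  occurrences.foldl (fun hist q =>
                    hist.insert q.2 ((hist.getD q.2 PySem.Dict.empty).insert (q.1 - p.2.1)
                      ((hist.getD q.2 PySem.Dict.empty).getD (q.1 - p.2.1) 0 + 1))) hist)
            (pvMapC PySem.Dict.empty)).items.foldl
            (fun acc r => acc ++ [(r.1, PySem.List.maxD r.2.items (fun kv => kv.2) ((0 : Int), (0 : Int)))]) [])
          (fun x => x.2.2) true := rfl
  rw [hA, hB, pvFoldOuter]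
  congr 1
  · -- the pre-sort score lists agree
    rw [PySem.List.foldl_append_singleton_eq_map
      (fun r : Int × PySem.Dict Int Int => (r.1, PySem.List.maxD r.2.items (fun kv => kv.2) ((0 : Int), (0 : Int))))]
    have hnd : ((pvMpa hashes database).items.map (fun r => r.1)).Nodup :=
      pvANodup (PySem.Dict.ofList database) (PySem.Dict.ofList hashes).items PySem.Dict.empty
        PySem.Dict.nodup_keys_empty
    rw [PySem.Dict.items_foldl_insert_fresh (pvMpa hashes database).items (fun r => r.1)
      (fun r => pvScan (pvByOff r.2)) PySem.Dict.empty
      (fun a _ => PySem.Dict.contains_empty a.1) hnd]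
    show [] ++ _ = ((pvMapC (pvMpa hashes database)).items.map _)
    rw [pvMapC, List.nil_append]
    show _ = ((pvMpa hashes database).items.map (fun r => (r.1, pvCnt r.2))).map
      (fun r : Int × PySem.Dict Int Int => (r.1, PySem.List.maxD r.2.items (fun kv => kv.2) ((0 : Int), (0 : Int))))
    rw [List.map_map]
    apply List.map_congr_left
    intro r _
    show (r.1, pvScan (pvByOff r.2)) = (r.1, PySem.List.maxD (pvCnt r.2).items (fun kv => kv.2) ((0 : Int), (0 : Int)))
    rw [pvByOff_eq, pvScan, pvCnt, pvMaxScan]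

-- ===== VERDICT (by name: the statement is the Claim_ definition above) =====
theorem score_hashes_against_database_spec : Claim_equal_score_hashes_against_database :=
  fun hashes database _ => pvMain hashes database
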